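-- pv_equiv track=rewrite | github.com/nickyfoto/lc | python/tests/1319_number_of_operations_to_make_network_connected.py | makeConnected
-- ===== SOURCE A (Python) =====
-- from collections import defaultdict
--
-- def makeConnected(n, connections):
--     if len(connections) < n - 1: return -1
--     g = {i: {} for i in range(n)}
--     for u, v in connections:
--         g[u][v] = {}
--         g[v][u] = {}
--
--     visited = defaultdict(lambda: False)
--
--     def dfs(node):
--         visited[node] = True
--         for n in g[node]:
--             if not visited[n]:
--                 dfs(n)
--
--     def cc(g):
--         num_cc = 0
--         for node in g:
--             if not visited[node]:
--                 dfs(node)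
--                 num_cc += 1
--         return num_cc
--     return cc(g) - 1
-- ===== SOURCE B (Python) =====
-- def makeConnected(n, connections):
--     # Iterative explicit-stack DFS over adjacency lists (no recursion, no nested dicts).
--     if len(connections) < n - 1:
--         return -1
--     adj = {i: [] for i in range(n)}
--     for u, v in connections:
--         adj[u].append(v)
--         adj[v].append(u)
--     seen = set()
--     components = 0
--     for i in range(n):
--         if i in seen:
--             continue
--         components += 1
--         stack = [i]
--         while stack:
--             node = stack.pop()
--             if node in seen:
--                 continue
--             seen.add(node)
--             stack.extend(reversed(adj[node]))  # reversed: keep recursive DFS order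
--     return components - 1
-- ===== Notes on version B (the rewrite author's own statement) =====
-- stated objective: alternative
-- what changed: Replaces the recursive dict-of-dicts DFS with an iterative explicit-stack DFS over plain adjacency lists (no recursion, no nested dicts), counting components in the outer range(n) scan.
import Mathlib
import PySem

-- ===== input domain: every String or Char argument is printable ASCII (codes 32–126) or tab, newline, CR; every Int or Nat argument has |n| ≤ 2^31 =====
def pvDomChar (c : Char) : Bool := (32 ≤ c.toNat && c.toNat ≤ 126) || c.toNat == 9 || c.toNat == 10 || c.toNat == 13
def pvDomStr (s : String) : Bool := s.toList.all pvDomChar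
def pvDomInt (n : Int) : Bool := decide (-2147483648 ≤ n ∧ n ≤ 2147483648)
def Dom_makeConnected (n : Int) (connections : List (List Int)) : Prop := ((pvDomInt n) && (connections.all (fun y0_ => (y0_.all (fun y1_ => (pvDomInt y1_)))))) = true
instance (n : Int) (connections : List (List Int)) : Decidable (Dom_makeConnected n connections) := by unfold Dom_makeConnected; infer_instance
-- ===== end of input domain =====

-- B replaces A's recursive dict-of-dicts DFS by an iterative explicit-stack DFS over adjacency
-- lists (objective: alternative decomposition, same asymptotic cost).


-- ===== PORT A =====
-- A's inner stored value '{}' (never read) is modelled as Unit.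
-- one edge step of A's build loop: g[u][v] = {}; g[v][u] = {}
def gStepA (d : PySem.Dict Int (PySem.Dict Int Unit)) (e : List Int) : PySem.Dict Int (PySem.Dict Int Unit) :=
  match e with
  | [u, v] =>
    let d1 := match d.get? u with
      | some du => d.insert u (du.insert v ())
      | none => d          -- Python: KeyError (excluded by Pre_)
    match d1.get? v with
    | some dv => d1.insert v (dv.insert u ())
    | none => d1           -- Python: KeyError (excluded by Pre_)
  | _ => d                 -- Python: ValueError unpacking 'u, v' (excluded by Pre_)

-- g = {i: {} for i in range(n)} followed by the edge loop
def buildG (n : Int) (connections : List (List Int)) : PySem.Dict Int (PySem.Dict Int Unit) :=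
  connections.foldl gStepA
    ((PySem.List.pyRange 0 n 1).foldl (fun d i => d.insert i PySem.Dict.empty) PySem.Dict.empty)

-- the recursive dfs; 'visited' (a defaultdict used as a set) is the PySem.Set of nodes marked True.
-- 'fuel' is a pure totality guard (each nested call marks a previously unmarked key, so the
-- fuel n.toNat + 1 passed by dfscount is never exhausted); the none-branch is Python's KeyError
-- on g[node] (excluded by Pre_).
mutual
def dfsA (g : PySem.Dict Int (PySem.Dict Int Unit)) (fuel : Nat) (visited : PySem.Set Int) (node : Int) : PySem.Set Int :=
  match fuel, g.get? node with
  | fuel' + 1, some d => dfsAList g fuel' (PySem.Set.add visited node) (PySem.Dict.keys d)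
  | _, _ => PySem.Set.add visited node
termination_by (fuel, 0)
def dfsAList (g : PySem.Dict Int (PySem.Dict Int Unit)) (fuel : Nat) (visited : PySem.Set Int) (nbs : List Int) : PySem.Set Int :=
  match nbs with
  | [] => visited
  | nb :: rest =>
    dfsAList g fuel (if PySem.Set.contains visited nb then visited else dfsA g fuel visited nb) rest
termination_by (fuel, nbs.length + 1)
end

-- cc(g): iterate over g's keys (dict iteration order), dfs from each unvisited one
def dfscount (g : PySem.Dict Int (PySem.Dict Int Unit)) (fuel : Nat) : Int :=
  ((PySem.Dict.keys g).foldl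
    (fun (st : PySem.Set Int × Int) node =>
      if PySem.Set.contains st.1 node then st else (dfsA g fuel st.1 node, st.2 + 1))
    (PySem.Set.empty, 0)).2

def makeConnected (n : Int) (connections : List (List Int)) : Int :=
  if (connections.length : Int) < n - 1 then -1
  else
    dfscount (buildG n connections) (n.toNat + 1) - 1

-- ===== PORT B =====
-- one edge step of B's build loop: adj[u].append(v); adj[v].append(u)
def gStepB (d : PySem.Dict Int (List Int)) (e : List Int) : PySem.Dict Int (List Int) :=
  match e with
  | [u, v] =>
    let d1 := match d.get? u with
      | some lu => d.insert u (lu ++ [v])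
      | none => d          -- Python: KeyError (excluded by Pre_)
    match d1.get? v with
    | some lv => d1.insert v (lv ++ [u])
    | none => d1           -- Python: KeyError (excluded by Pre_)
  | _ => d                 -- Python: ValueError unpacking 'u, v' (excluded by Pre_)

-- adj = {i: [] for i in range(n)} followed by the edge loop
def buildAdj (n : Int) (connections : List (List Int)) : PySem.Dict Int (List Int) :=
  connections.foldl gStepB
    ((PySem.List.pyRange 0 n 1).foldl (fun d i => d.insert i ([] : List Int)) PySem.Dict.empty)

-- number of dict keys not yet in the visited set (termination measure of the while loop)
def unvisN (ks : List Int) (v : PySem.Set Int) : Nat :=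
  (ks.toFinset \ v.toFinset).card

-- (termination helpers for stackB; cited in its decreasing_by)
theorem pv_unvis_add_not_mem (ks : List Int) (v : PySem.Set Int) (x : Int)
    (hx : x ∉ ks) : unvisN ks (PySem.Set.add v x) = unvisN ks v := by
  unfold unvisN
  congr 1
  ext a
  simp only [Finset.mem_sdiff, List.mem_toFinset, PySem.Set.mem_add]
  constructor
  · exact fun ⟨h1, h2⟩ => ⟨h1, fun hv => h2 (Or.inl hv)⟩
  · rintro ⟨h1, h2⟩
    refine ⟨h1, ?_⟩
    rintro (hv | rfl)
    · exact h2 hv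
    · exact hx h1

theorem pv_unvis_add_lt (ks : List Int) (v : PySem.Set Int) (x : Int)
    (hx : x ∈ ks) (hv : PySem.Set.contains v x = false) :
    unvisN ks (PySem.Set.add v x) < unvisN ks v := by
  unfold unvisN
  apply Finset.card_lt_card
  constructor
  · intro a ha
    simp only [Finset.mem_sdiff, List.mem_toFinset, PySem.Set.mem_add] at *
    exact ⟨ha.1, fun hm => ha.2 (Or.inl hm)⟩
  · intro hsub
    have hxmem : x ∈ ks.toFinset \ v.toFinset := by
      simp only [Finset.mem_sdiff, List.mem_toFinset]
      refine ⟨hx, fun hm => ?_⟩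
      rw [← (PySem.Set.contains_iff v x)] at hm
      rw [hv] at hm; exact Bool.false_ne_true hm
    have := hsub hxmem
    simp only [Finset.mem_sdiff, List.mem_toFinset, PySem.Set.mem_add] at this
    exact this.2 (Or.inr trivial)

-- the while loop: stack with its top at the head (Python's list top is the last element;
-- extend(reversed(adj[node])) therefore prepends adj[node] head-first); the none branch is
-- Python's KeyError on adj[node] (excluded by Pre_).
def stackB (adj : PySem.Dict Int (List Int)) (visited : PySem.Set Int) (stack : List Int) : PySem.Set Int :=
  match stack with
  | [] => visited
  | node :: rest =>
    if hvis : PySem.Set.contains visited node then stackB adj visited rest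
    else
      match hget : adj.get? node with
      | none => stackB adj (PySem.Set.add visited node) rest
      | some l => stackB adj (PySem.Set.add visited node) (l ++ rest)
termination_by (unvisN (PySem.Dict.keys adj) visited, stack.length)
decreasing_by
  · exact Prod.Lex.right _ (by simp)
  · rw [pv_unvis_add_not_mem]
    · exact Prod.Lex.right _ (by simp)
    · exact (PySem.Dict.get?_eq_none_iff_not_mem_keys adj node).mp hget
  · apply Prod.Lex.left
    apply pv_unvis_add_lt
    · exact (PySem.Dict.contains_iff_mem_keys adj node).mp (by rw [PySem.Dict.contains_eq_isSome_get?, hget]; rfl)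
    · simpa using hvis

def makeConnected_alt (n : Int) (connections : List (List Int)) : Int :=
  if (connections.length : Int) < n - 1 then -1
  else
    let adj := buildAdj n connections
    ((PySem.List.pyRange 0 n 1).foldl
      (fun (st : PySem.Set Int × Int) i =>
        if PySem.Set.contains st.1 i then st
        else (stackB adj st.1 [i], st.2 + 1))
      (PySem.Set.empty, 0)).2 - 1

-- ===== PRECONDITION & SPEC =====
-- Pre_ excludes exactly the inputs on which Python A raises: an edge that is not a 2-element list
-- (ValueError on unpacking) or an endpoint outside range(n) (KeyError) — unless the early
-- 'len(connections) < n - 1' guard returns -1 before the edges are read.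
def Pre_makeConnected (n : Int) (connections : List (List Int)) : Prop :=
  (connections.length : Int) < n - 1 ∨
  connections.all (fun e => e.length == 2 && e.all (fun x => decide (0 ≤ x ∧ x < n))) = true
instance (n : Int) (connections : List (List Int)) : Decidable (Pre_makeConnected n connections) := by
  unfold Pre_makeConnected; infer_instance

def pvWitness_makeConnected : Int × List (List Int) := (3, [[0, 1], [1, 2]])

def Spec_makeConnected (n : Int) (connections : List (List Int)) (out : Int) : Prop := out = makeConnected_alt n connections
instance (n : Int) (connections : List (List Int)) (out : Int) : Decidable (Spec_makeConnected n connections out) := by unfold Spec_makeConnected; infer_instance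

-- ===== CLAIM (what is proved, stated in full; the proofs are below) =====
def Claim_equal_makeConnected : Prop := ∀ (n : Int) (connections : List (List Int)), Dom_makeConnected n connections → Pre_makeConnected n connections → Spec_makeConnected n connections (makeConnected n connections)

-- ===== LEMMAS AND PROOFS =====

theorem pv_unvis_anti (ks : List Int) {v w : PySem.Set Int}
    (h : ∀ x ∈ v, x ∈ w) : unvisN ks w ≤ unvisN ks v := by
  unfold unvisN
  apply Finset.card_le_card
  intro a ha
  simp only [Finset.mem_sdiff, List.mem_toFinset] at *
  exact ⟨ha.1, fun hv => ha.2 (h a hv)⟩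


-- membership bridges and basic facts about the two DFS engines

theorem pv_unvis_le (ks : List Int) (v : PySem.Set Int) : unvisN ks v ≤ ks.length := by
  unfold unvisN
  calc (ks.toFinset \ v.toFinset).card ≤ ks.toFinset.card :=
        Finset.card_le_card (Finset.sdiff_subset)
    _ ≤ ks.length := ks.toFinset_card_le

theorem pv_dfs_mono (g : PySem.Dict Int (PySem.Dict Int Unit)) :
    ∀ fuel : Nat,
      (∀ (v : PySem.Set Int) (node x : Int), x ∈ v → x ∈ dfsA g fuel v node) ∧
      (∀ (nbs : List Int) (v : PySem.Set Int) (x : Int), x ∈ v → x ∈ dfsAList g fuel v nbs) := by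
  intro fuel
  induction fuel with
  | zero =>
    have hA : ∀ (v : PySem.Set Int) (node x : Int), x ∈ v → x ∈ dfsA g 0 v node := by
      intro v node x hx
      cases h : g.get? node <;> simp [dfsA, h, PySem.Set.mem_add] <;> exact Or.inl hx
    refine ⟨hA, ?_⟩
    intro nbs
    induction nbs with
    | nil => intro v x hx; simpa [dfsAList] using hx
    | cons nb rest ih2 =>
      intro v x hx
      rw [dfsAList]
      apply ih2
      split
      · exact hx
      · exact hA v nb x hx
  | succ f ih =>
    have hA : ∀ (v : PySem.Set Int) (node x : Int), x ∈ v → x ∈ dfsA g (f + 1) v node := by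
      intro v node x hx
      cases h : g.get? node with
      | none => simp [dfsA, h, PySem.Set.mem_add]; exact Or.inl hx
      | some d =>
        have hsub := ih.2 (PySem.Dict.keys d) (PySem.Set.add v node) x
          ((PySem.Set.mem_add v node x).mpr (Or.inl hx))
        simpa [dfsA, h] using hsub
    refine ⟨hA, ?_⟩
    intro nbs
    induction nbs with
    | nil => intro v x hx; simpa [dfsAList] using hx
    | cons nb rest ih2 =>
      intro v x hx
      rw [dfsAList]
      apply ih2
      split
      · exact hx
      · exact hA v nb x hx

theorem pv_dfsAList_append (g : PySem.Dict Int (PySem.Dict Int Unit)) (fuel : Nat)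
    (l1 l2 : List Int) : ∀ v : PySem.Set Int,
    dfsAList g fuel v (l1 ++ l2) = dfsAList g fuel (dfsAList g fuel v l1) l2 := by
  induction l1 with
  | nil => intro v; simp [dfsAList]
  | cons a t ih => intro v; rw [List.cons_append, dfsAList, dfsAList]; exact ih _

theorem pv_dfsA_self (g : PySem.Dict Int (PySem.Dict Int Unit)) (fuel : Nat)
    (v : PySem.Set Int) (node : Int) : node ∈ dfsA g fuel v node := by
  cases fuel with
  | zero =>
    cases h : g.get? node <;> simp [dfsA, h, PySem.Set.mem_add]
  | succ f =>
    cases h : g.get? node with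
    | none => simp [dfsA, h, PySem.Set.mem_add]
    | some d =>
      have hsub := (pv_dfs_mono g f).2 (PySem.Dict.keys d) (PySem.Set.add v node) node
        ((PySem.Set.mem_add v node node).mpr (Or.inr rfl))
      simpa [dfsA, h] using hsub

theorem pv_mem_dfsAList (g : PySem.Dict Int (PySem.Dict Int Unit)) (fuel : Nat)
    (l : List Int) : ∀ (v : PySem.Set Int) (x : Int), x ∈ l → x ∈ dfsAList g fuel v l := by
  induction l with
  | nil => intro v x hx; cases hx
  | cons a t ih =>
    intro v x hx
    rw [dfsAList]
    rcases List.mem_cons.mp hx with rfl | hxt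
    · split
      · next hc => exact (pv_dfs_mono g fuel).2 t v x ((PySem.Set.contains_iff v x).mp hc)
      · exact (pv_dfs_mono g fuel).2 t _ x (pv_dfsA_self g fuel v x)
    · exact ih _ x hxt

theorem pv_dfsAList_dedup (g : PySem.Dict Int (PySem.Dict Int Unit)) (fuel : Nat)
    (v : PySem.Set Int) (l : List Int) :
    dfsAList g fuel v (PySem.List.dedup l) = dfsAList g fuel v l := by
  induction l using List.reverseRecOn with
  | nil => simp [PySem.List.dedup, PySem.Set.ofList]
  | append_singleton l x ih =>
    have hded : PySem.List.dedup (l ++ [x]) = PySem.Set.add (PySem.List.dedup l) x := by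
      rw [PySem.List.dedup_eq_ofList, PySem.Set.ofList_eq_foldl, List.foldl_append]
      rw [PySem.List.dedup_eq_ofList, PySem.Set.ofList_eq_foldl]
      rfl
    by_cases hc : PySem.Set.contains (PySem.List.dedup l) x = true
    · have hxl : x ∈ l := by
        have h1 := (PySem.Set.contains_iff (PySem.List.dedup l) x).mp hc
        exact (PySem.List.mem_dedup l x).mp h1
      have hadd : PySem.Set.add (PySem.List.dedup l) x = PySem.List.dedup l := by
        simp [PySem.Set.add, hc, hxl]
      rw [hded, hadd, ih, pv_dfsAList_append]
      have hxv : x ∈ dfsAList g fuel v l := pv_mem_dfsAList g fuel l v x hxl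
      simp [dfsAList, hxv]
    · have hxnot : x ∉ l := by
        intro hm
        exact hc ((PySem.Set.contains_iff _ x).mpr ((PySem.List.mem_dedup l x).mpr hm))
      have hadd : PySem.Set.add (PySem.List.dedup l) x = PySem.List.dedup l ++ [x] := by
        simp [PySem.Set.add, hc, hxnot]
      rw [hded, hadd, pv_dfsAList_append, ih, ← pv_dfsAList_append]

-- the relation between A's dict-of-dicts graph and B's adjacency lists:
-- same keys present, and A's neighbour dict keys are the first occurrences of B's neighbour list
def pvGRel (gA : PySem.Dict Int (PySem.Dict Int Unit)) (gB : PySem.Dict Int (List Int)) : Prop :=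
  ∀ k : Int, (gA.get? k).map PySem.Dict.keys = (gB.get? k).map PySem.List.dedup

theorem pv_grel_upd {gA : PySem.Dict Int (PySem.Dict Int Unit)} {gB : PySem.Dict Int (List Int)}
    (h : pvGRel gA gB) (u w : Int) :
    pvGRel (match gA.get? u with
            | some du => gA.insert u (du.insert w ())
            | none => gA)
           (match gB.get? u with
            | some lu => gB.insert u (lu ++ [w])
            | none => gB) := by
  cases hB : gB.get? u with
  | none =>
    have hA : gA.get? u = none := by
      have := h u
      rw [hB] at this
      simpa using this
    rw [hA]
    exact h
  | some lu =>
    have hA : ∃ du, gA.get? u = some du ∧ PySem.Dict.keys du = PySem.List.dedup lu := by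
      have := h u
      rw [hB] at this
      simpa [Option.map_eq_some_iff] using this
    obtain ⟨du, hAu, hk⟩ := hA
    rw [hAu]
    show pvGRel (gA.insert u (du.insert w ())) (gB.insert u (lu ++ [w]))
    intro k
    rw [PySem.Dict.get?_insert, PySem.Dict.get?_insert]
    by_cases hku : k = u
    · subst hku
      simp only [if_pos rfl, if_true, Option.map_some]
      have hded : PySem.List.dedup (lu ++ [w]) = PySem.Set.add (PySem.List.dedup lu) w := by
        rw [PySem.List.dedup_eq_ofList, PySem.Set.ofList_eq_foldl, List.foldl_append]
        rw [PySem.List.dedup_eq_ofList, PySem.Set.ofList_eq_foldl]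
        rfl
      by_cases hcw : du.contains w = true
      · have hwl : w ∈ lu := (PySem.List.mem_dedup lu w).mp
          (by rw [← hk]; exact (PySem.Dict.contains_iff_mem_keys du w).mp hcw)
        have h2 : PySem.Set.add (PySem.List.dedup lu) w = PySem.List.dedup lu := by
          simp [PySem.Set.add, hwl]
        rw [PySem.Dict.keys_insert_of_contains du () hcw, hk, hded, h2]
      · have hwl : w ∉ lu := by
          intro hm
          exact hcw ((PySem.Dict.contains_iff_mem_keys du w).mpr
            (by rw [hk]; exact (PySem.List.mem_dedup lu w).mpr hm))
        have h2 : PySem.Set.add (PySem.List.dedup lu) w = PySem.List.dedup lu ++ [w] := by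
          simp [PySem.Set.add, hwl]
        rw [PySem.Dict.keys_insert_of_not_contains du () (by simpa using hcw), hk, hded, h2]
    · simp only [if_neg hku]
      exact h k

theorem pv_grel_step {gA : PySem.Dict Int (PySem.Dict Int Unit)} {gB : PySem.Dict Int (List Int)}
    (h : pvGRel gA gB) (e : List Int) : pvGRel (gStepA gA e) (gStepB gB e) := by
  match e with
  | [] => exact h
  | [u] => exact h
  | [u, v] =>
    simp only [gStepA, gStepB]
    exact pv_grel_upd (pv_grel_upd h u v) v u
  | u :: v :: w :: t => exact h

theorem pv_grel_fold (cs : List (List Int)) : ∀ (gA' : PySem.Dict Int (PySem.Dict Int Unit)) (gB' : PySem.Dict Int (List Int)),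
    pvGRel gA' gB' → pvGRel (cs.foldl gStepA gA') (cs.foldl gStepB gB') := by
  induction cs with
  | nil => intro gA' gB' h; exact h
  | cons e t ih => intro gA' gB' h; exact ih _ _ (pv_grel_step h e)

theorem pv_grel_init (ks : List Int) :
    ∀ (dA : PySem.Dict Int (PySem.Dict Int Unit)) (dB : PySem.Dict Int (List Int)),
    pvGRel dA dB →
    pvGRel (ks.foldl (fun d i => d.insert i PySem.Dict.empty) dA)
           (ks.foldl (fun d i => d.insert i ([] : List Int)) dB) := by
  induction ks with
  | nil => intro dA dB h; exact h
  | cons i t ih =>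
    intro dA dB h
    apply ih
    intro k
    rw [PySem.Dict.get?_insert, PySem.Dict.get?_insert]
    by_cases hk : k = i
    · simp [hk, PySem.List.dedup, PySem.Set.ofList]
    · simp only [if_neg hk]
      exact h k

theorem pv_grel_build (n : Int) (cs : List (List Int)) :
    pvGRel (buildG n cs) (buildAdj n cs) := by
  unfold buildG buildAdj
  exact pv_grel_fold cs _ _ (pv_grel_init (PySem.List.pyRange 0 n 1) PySem.Dict.empty
    PySem.Dict.empty (fun k => by simp [PySem.Dict.get?_empty]))

-- keys of A's graph: the build loop only overwrites existing keys, so keys g = range(n)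
theorem pv_keys_gStepA (d : PySem.Dict Int (PySem.Dict Int Unit)) (e : List Int) :
    (gStepA d e).keys = d.keys := by
  match e with
  | [] => rfl
  | [u] => rfl
  | [u, v] =>
    simp only [gStepA]
    cases hu : d.get? u with
    | none =>
      cases hv : d.get? v with
      | none => simp
      | some dv =>
        have : d.contains v = true := by rw [PySem.Dict.contains_eq_isSome_get?, hv]; rfl
        simp [PySem.Dict.keys_insert_of_contains _ _ this]
    | some du =>
      have hcu : d.contains u = true := by rw [PySem.Dict.contains_eq_isSome_get?, hu]; rfl
      cases hv : (d.insert u (du.insert v ())).get? v with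
      | none => simp [PySem.Dict.keys_insert_of_contains _ _ hcu]
      | some dv =>
        have hcv : (d.insert u (du.insert v ())).contains v = true := by
          rw [PySem.Dict.contains_eq_isSome_get?, hv]; rfl
        simp [PySem.Dict.keys_insert_of_contains _ _ hcv,
              PySem.Dict.keys_insert_of_contains _ _ hcu]
  | u :: v :: w :: t => rfl

theorem pv_dedup_self {l : List Int} (h : l.Nodup) : PySem.List.dedup l = l := by
  induction l using List.reverseRecOn with
  | nil => simp [PySem.List.dedup, PySem.Set.ofList]
  | append_singleton t x ih =>
    have h' := h
    simp only [List.nodup_append, List.nodup_cons, List.not_mem_nil, not_false_iff,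
      List.nodup_nil, List.disjoint_singleton, and_true, true_and] at h'
    have ht : t.Nodup := h'.1
    have hx : x ∉ t := fun hm => h'.2 x hm x (List.mem_singleton_self x) rfl
    have hded : PySem.List.dedup (t ++ [x]) = PySem.Set.add (PySem.List.dedup t) x := by
      rw [PySem.List.dedup_eq_ofList, PySem.Set.ofList_eq_foldl, List.foldl_append]
      rw [PySem.List.dedup_eq_ofList, PySem.Set.ofList_eq_foldl]
      rfl
    rw [hded, ih ht]
    simp [PySem.Set.add, hx]

theorem pv_keys_buildG (n : Int) (cs : List (List Int)) :
    (buildG n cs).keys = PySem.List.pyRange 0 n 1 := by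
  unfold buildG
  have hfold : ∀ (cs' : List (List Int)) (d : PySem.Dict Int (PySem.Dict Int Unit)),
      (cs'.foldl gStepA d).keys = d.keys := by
    intro cs'
    induction cs' with
    | nil => intro d; rfl
    | cons e t ih => intro d; rw [List.foldl_cons, ih, pv_keys_gStepA]
  rw [hfold]
  rw [PySem.Dict.keys_foldl_insert (f := fun _ _ => PySem.Dict.empty)]
  have hupd : PySem.Set.update (PySem.Dict.keys (PySem.Dict.empty : PySem.Dict Int (PySem.Dict Int Unit))) (PySem.List.pyRange 0 n 1) = PySem.List.dedup (PySem.List.pyRange 0 n 1) := by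
    simp [PySem.Set.update, PySem.Dict.keys_empty, PySem.List.dedup_eq_ofList, PySem.Set.ofList_eq_foldl]
  rw [hupd, pv_dedup_self (PySem.List.nodup_pyRange_one 0 n)]



-- one-step unfolding lemmas for the two engines

theorem pv_stackB_nil (adj : PySem.Dict Int (List Int)) (v : PySem.Set Int) :
    stackB adj v [] = v := by simp [stackB]

theorem pv_stackB_cons_vis (adj : PySem.Dict Int (List Int)) (v : PySem.Set Int)
    (x : Int) (st : List Int) (hc : PySem.Set.contains v x = true) :
    stackB adj v (x :: st) = stackB adj v st := by
  rw [stackB, dif_pos hc]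

theorem pv_stackB_cons_none (adj : PySem.Dict Int (List Int)) (v : PySem.Set Int)
    (x : Int) (st : List Int) (hc : ¬ PySem.Set.contains v x = true)
    (hg : adj.get? x = none) :
    stackB adj v (x :: st) = stackB adj (PySem.Set.add v x) st := by
  rw [stackB, dif_neg hc]
  split
  · rfl
  · next l' heq => rw [hg] at heq; cases heq

theorem pv_stackB_cons_some (adj : PySem.Dict Int (List Int)) (v : PySem.Set Int)
    (x : Int) (st l : List Int) (hc : ¬ PySem.Set.contains v x = true)
    (hg : adj.get? x = some l) :
    stackB adj v (x :: st) = stackB adj (PySem.Set.add v x) (l ++ st) := by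
  rw [stackB, dif_neg hc]
  split
  · next heq => rw [hg] at heq; cases heq
  · next l' heq =>
      rw [hg] at heq
      injection heq with h'
      rw [h']

theorem pv_dfsAList_cons (g : PySem.Dict Int (PySem.Dict Int Unit)) (fuel : Nat)
    (v : PySem.Set Int) (x : Int) (rest : List Int) :
    dfsAList g fuel v (x :: rest)
      = dfsAList g fuel (if PySem.Set.contains v x then v else dfsA g fuel v x) rest := by
  rw [dfsAList]

theorem pv_dfsA_none (g : PySem.Dict Int (PySem.Dict Int Unit)) (fuel : Nat)
    (v : PySem.Set Int) (node : Int) (hg : g.get? node = none) :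
    dfsA g fuel v node = PySem.Set.add v node := by
  cases fuel <;> simp [dfsA, hg]

theorem pv_dfsA_some (g : PySem.Dict Int (PySem.Dict Int Unit)) (f : Nat)
    (v : PySem.Set Int) (node : Int) (d : PySem.Dict Int Unit)
    (hg : g.get? node = some d) :
    dfsA g (f + 1) v node = dfsAList g f (PySem.Set.add v node) (PySem.Dict.keys d) := by
  simp [dfsA, hg]

-- the simulation: B's explicit stack run over 'lb' on top of 's' computes exactly the visited
-- set A's recursive DFS produces from the same worklist (given enough fuel on A's side)
theorem pv_sim (gA : PySem.Dict Int (PySem.Dict Int Unit)) (gB : PySem.Dict Int (List Int))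
    (hrel : pvGRel gA gB) :
    ∀ N : Nat, ∀ (fuel : Nat) (v : PySem.Set Int) (lb s : List Int),
      unvisN (PySem.Dict.keys gA) v ≤ N → unvisN (PySem.Dict.keys gA) v < fuel →
      stackB gB v (lb ++ s) = stackB gB (dfsAList gA fuel v lb) s := by
  intro N
  induction N using Nat.strong_induction_on with
  | _ N ihN =>
    intro fuel v lb s hN hfuel
    induction lb generalizing v s fuel with
    | nil => simp [dfsAList]
    | cons x rest ihl =>
      rw [List.cons_append, pv_dfsAList_cons]
      by_cases hc : PySem.Set.contains v x = true
      · rw [pv_stackB_cons_vis gB v x _ hc, if_pos hc]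
        exact ihl fuel v s hN hfuel
      · rw [if_neg hc]
        cases hg : gB.get? x with
        | none =>
          have hgA : gA.get? x = none := by
            have := hrel x
            rw [hg] at this
            simpa using this
          have hxk : x ∉ PySem.Dict.keys gA :=
            (PySem.Dict.get?_eq_none_iff_not_mem_keys gA x).mp hgA
          have hunvis := pv_unvis_add_not_mem (PySem.Dict.keys gA) v x hxk
          rw [pv_stackB_cons_none gB v x _ hc hg, pv_dfsA_none gA fuel v x hgA]
          exact ihl fuel (PySem.Set.add v x) s (by omega) (by omega)
        | some lB =>
          have hgA : ∃ du, gA.get? x = some du ∧ PySem.Dict.keys du = PySem.List.dedup lB := by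
            have := hrel x
            rw [hg] at this
            simpa [Option.map_eq_some_iff] using this
          obtain ⟨du, hgAx, hk⟩ := hgA
          have hxk : x ∈ PySem.Dict.keys gA :=
            (PySem.Dict.contains_iff_mem_keys gA x).mp
              (by rw [PySem.Dict.contains_eq_isSome_get?, hgAx]; rfl)
          have hlt : unvisN (PySem.Dict.keys gA) (PySem.Set.add v x) < unvisN (PySem.Dict.keys gA) v :=
            pv_unvis_add_lt _ v x hxk (by simpa using hc)
          obtain ⟨f', rfl⟩ : ∃ f', fuel = f' + 1 := ⟨fuel - 1, by omega⟩
          rw [pv_stackB_cons_some gB v x _ lB hc hg]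
          have e1 := ihN (unvisN (PySem.Dict.keys gA) (PySem.Set.add v x)) (by omega)
            f' (PySem.Set.add v x) lB (rest ++ s) le_rfl (by omega)
          rw [e1]
          have hv2 : dfsAList gA f' (PySem.Set.add v x) lB = dfsA gA (f' + 1) v x := by
            rw [pv_dfsA_some gA f' v x du hgAx, hk, pv_dfsAList_dedup]
          set v2 := dfsAList gA f' (PySem.Set.add v x) lB with hv2def
          have hmono : ∀ y ∈ PySem.Set.add v x, y ∈ v2 :=
            fun y hy => (pv_dfs_mono gA f').2 lB (PySem.Set.add v x) y hy
          have hle2 : unvisN (PySem.Dict.keys gA) v2 ≤ unvisN (PySem.Dict.keys gA) (PySem.Set.add v x) :=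
            pv_unvis_anti _ hmono
          have e2 := ihN (unvisN (PySem.Dict.keys gA) v2) (by omega)
            (f' + 1) v2 rest s le_rfl (by omega)
          rw [e2, hv2]
  
-- from one unvisited seed, the stack loop equals A's recursive dfs
theorem pv_single (gA : PySem.Dict Int (PySem.Dict Int Unit)) (gB : PySem.Dict Int (List Int))
    (hrel : pvGRel gA gB) (F : Nat) (v : PySem.Set Int) (i : Int)
    (hc : ¬ PySem.Set.contains v i = true)
    (hfuel : unvisN (PySem.Dict.keys gA) v < F) :
    stackB gB v [i] = dfsA gA F v i := by
  have h := pv_sim gA gB hrel (unvisN (PySem.Dict.keys gA) v) F v [i] [] le_rfl hfuel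
  simp only [List.append_nil] at h
  rw [h, pv_dfsAList_cons, if_neg hc]
  rw [show dfsAList gA F (dfsA gA F v i) [] = dfsA gA F v i from by simp [dfsAList]]
  exact pv_stackB_nil gB _

-- the component-counting folds agree step by step
theorem pv_loop (gA : PySem.Dict Int (PySem.Dict Int Unit)) (gB : PySem.Dict Int (List Int))
    (hrel : pvGRel gA gB) (F : Nat)
    (hF : ∀ v : PySem.Set Int, unvisN (PySem.Dict.keys gA) v < F) :
    ∀ (ks : List Int) (v : PySem.Set Int) (c : Int),
      ks.foldl (fun (st : PySem.Set Int × Int) node =>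
          if PySem.Set.contains st.1 node then st else (dfsA gA F st.1 node, st.2 + 1)) (v, c)
      = ks.foldl (fun (st : PySem.Set Int × Int) i =>
          if PySem.Set.contains st.1 i then st else (stackB gB st.1 [i], st.2 + 1)) (v, c) := by
  intro ks
  induction ks with
  | nil => intro v c; rfl
  | cons i t ih =>
    intro v c
    rw [List.foldl_cons, List.foldl_cons]
    by_cases hc : PySem.Set.contains v i = true
    · simp only [hc, if_pos]
      exact ih v c
    · simp only [hc, if_neg, Bool.false_eq_true, if_false]
      rw [pv_single gA gB hrel F v i hc (hF v)]
      exact ih _ _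

theorem pv_unvis_lt_F (gA : PySem.Dict Int (PySem.Dict Int Unit)) (n : Int)
    (hkeys : PySem.Dict.keys gA = PySem.List.pyRange 0 n 1) (v : PySem.Set Int) :
    unvisN (PySem.Dict.keys gA) v < n.toNat + 1 := by
  have h1 := pv_unvis_le (PySem.Dict.keys gA) v
  rw [hkeys] at h1
  rw [hkeys]
  have h2 : (PySem.List.pyRange 0 n 1).length = n.toNat := by
    rw [PySem.List.length_pyRange_one]
    simp
  omega

-- ===== VERDICT (by name: the statement is the Claim_ definition above) =====
theorem makeConnected_spec : Claim_equal_makeConnected := by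
  unfold Claim_equal_makeConnected
  intro n cs _hDom _hPre
  unfold Spec_makeConnected makeConnected makeConnected_alt dfscount
  by_cases hlt : (cs.length : Int) < n - 1
  · simp [hlt]
  · simp only [hlt, if_false]
    have hkeys := pv_keys_buildG n cs
    have hrel := pv_grel_build n cs
    have hF := pv_unvis_lt_F (buildG n cs) n hkeys
    rw [hkeys]
    rw [pv_loop (buildG n cs) (buildAdj n cs) hrel (n.toNat + 1) hF (PySem.List.pyRange 0 n 1) PySem.Set.empty 0]
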